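-- pv_equiv track=rewrite | github.com/keikomorimoto/CFG-homework | homework-3/homework_week3_FOR STUDENTS.py | generate_phrase
-- ===== SOURCE A (Python) =====
-- def generate_phrase(characters, phrase):
--     # create a dictionary and add the available chars from characters
--     available_char = {}  # eg. {'c': 3, 'b': 2, 'a': 2, '@': 1, ' ': 2}
--     for char in characters:
--         available_char[char] = available_char.get(char, 0) + 1  # get() uses the default value for non-existent keys
--
--     # Check if enough chars available, once the stock becomes -1, returns False
--     for char in phrase:
--         available_char[char] = available_char.get(char, 0) - 1
--         if available_char[char] < 0:
--             return False
--     return True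
-- ===== SOURCE B (Python) =====
-- def generate_phrase(characters, phrase):
--     # Sort both strings and check that the sorted phrase is a subsequence of the
--     # sorted supply with a two-pointer merge scan (multiset inclusion on sorted lists).
--     supply = sorted(characters)
--     n = len(supply)
--     i = 0
--     for ch in sorted(phrase):
--         while i < n and supply[i] < ch:
--             i += 1
--         if i == n or supply[i] != ch:
--             return False
--         i += 1
--     return True
-- ===== Notes on version B (the rewrite author's own statement) =====
-- stated objective: alternative
-- what changed: Replaces A's hash-table counting with decrement-and-early-return by sorting both strings and running a two-pointer merge scan that checks the sorted phrase embeds as a subsequence of the sorted supply.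
import Mathlib
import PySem

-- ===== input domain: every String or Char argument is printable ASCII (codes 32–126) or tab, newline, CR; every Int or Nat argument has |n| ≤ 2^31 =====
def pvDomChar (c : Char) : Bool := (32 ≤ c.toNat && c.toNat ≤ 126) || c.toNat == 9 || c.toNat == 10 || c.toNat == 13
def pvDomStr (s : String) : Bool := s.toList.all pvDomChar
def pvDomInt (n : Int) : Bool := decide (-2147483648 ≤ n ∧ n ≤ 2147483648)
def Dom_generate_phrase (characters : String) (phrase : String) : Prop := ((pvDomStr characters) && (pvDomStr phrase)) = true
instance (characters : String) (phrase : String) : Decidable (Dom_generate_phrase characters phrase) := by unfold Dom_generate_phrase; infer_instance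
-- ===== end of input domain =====

-- B sorts both strings and runs a two-pointer merge scan (sorted phrase must embed
-- as a subsequence of the sorted supply) instead of A's counting-dict decrement loop
-- with early return (alternative algorithm; similar cost).

-- ===== PORT A =====
-- the 'for char in phrase' loop: decrement the stock, return False as soon as it goes negative
def pvCheckLoopA (d : PySem.Dict Char Int) : List Char → Bool
  | [] => true
  | c :: rest =>
    let d' := d.insert c (d.getD c 0 - 1)
    if d'.getD c 0 < 0 then false else pvCheckLoopA d' rest

def generate_phrase (characters : String) (phrase : String) : Bool :=
  let available_char :=
    characters.toList.foldl (fun d c => d.insert c (d.getD c 0 + 1)) PySem.Dict.empty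
  pvCheckLoopA available_char phrase.toList

-- ===== PORT B =====
-- the 'for ch in sorted(phrase)' loop over the remaining supply suffix (= supply[i:]):
-- the while loop is the dropWhile, then the membership test at the current pointer
def pvMergeB : List Char → List Char → Bool
  | _, [] => true
  | supply, c :: ds =>
    match supply.dropWhile (fun x => decide (x < c)) with
    | [] => false
    | x :: rest => if x ≠ c then false else pvMergeB rest ds

def generate_phrase_alt (characters : String) (phrase : String) : Bool :=
  let supply := PySem.List.sorted characters.toList (fun c => c) false
  let demand := PySem.List.sorted phrase.toList (fun c => c) false
  pvMergeB supply demand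

-- ===== PRECONDITION & SPEC =====
def Spec_generate_phrase (characters : String) (phrase : String) (out : Bool) : Prop := out = generate_phrase_alt characters phrase
instance (characters : String) (phrase : String) (out : Bool) : Decidable (Spec_generate_phrase characters phrase out) := by unfold Spec_generate_phrase; infer_instance

-- ===== CLAIM (what is proved, stated in full; the proofs are below) =====
def Claim_equal_generate_phrase : Prop := ∀ (characters : String) (phrase : String), Dom_generate_phrase characters phrase → Spec_generate_phrase characters phrase (generate_phrase characters phrase)

-- ===== LEMMAS AND PROOFS =====

-- A's loop succeeds iff every character demanded in the remaining phrase is still in stock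
theorem pvCheckLoopA_char (p : List Char) : ∀ d : PySem.Dict Char Int,
    pvCheckLoopA d p = decide (∀ c ∈ p, (p.count c : Int) ≤ d.getD c 0) := by
  induction p with
  | nil => intro d; simp [pvCheckLoopA]
  | cons c rest ih =>
    intro d
    simp only [pvCheckLoopA, PySem.Dict.getD_insert_self]
    by_cases h : d.getD c 0 - 1 < 0
    · simp only [if_pos h]
      symm
      simp only [decide_eq_false_iff_not]
      intro hall
      have h1 := hall c (List.mem_cons_self ..)
      have hc : ((c :: rest).count c : Int) = (rest.count c : Int) + 1 := by
        rw [List.count_cons_self]; push_cast; ring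
      omega
    · simp only [if_neg h, ih]
      apply decide_eq_decide.mpr
      constructor
      · intro hall x hx
        by_cases hxc : x = c
        · subst hxc
          have hc : ((x :: rest).count x : Int) = (rest.count x : Int) + 1 := by
            rw [List.count_cons_self]; push_cast; ring
          by_cases hmem : x ∈ rest
          · have h1 := hall x hmem
            rw [PySem.Dict.getD_insert_self] at h1
            omega
          · have h0 : rest.count x = 0 := List.count_eq_zero.mpr hmem
            rw [hc, h0]; push_cast; omega
        · rcases List.mem_cons.mp hx with h1 | h1
          · exact (hxc h1).elim
          · have h2 := hall x h1
            rw [PySem.Dict.getD_insert, if_neg hxc] at h2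
            have hc : ((c :: rest).count x : Int) = (rest.count x : Int) := by
              simp [Ne.symm hxc]
            omega
      · intro hall x hx
        rw [PySem.Dict.getD_insert]
        by_cases hxc : x = c
        · subst hxc
          have h1 := hall x (List.mem_cons_self ..)
          have hc : ((x :: rest).count x : Int) = (rest.count x : Int) + 1 := by
            rw [List.count_cons_self]; push_cast; ring
          rw [if_pos rfl]
          omega
        · have h1 := hall x (List.mem_cons_of_mem _ hx)
          have hc : ((c :: rest).count x : Int) = (rest.count x : Int) := by
            simp [Ne.symm hxc]
          rw [if_neg hxc]
          omega

-- the merge scan on two sorted lists decides multiset inclusion (count-wise)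
theorem pvMergeB_char (p : List Char) : ∀ s : List Char,
    p.Pairwise (· ≤ ·) → s.Pairwise (· ≤ ·) →
    (pvMergeB s p = decide (∀ a : Char, p.count a ≤ s.count a)) := by
  induction p with
  | nil => intro s _ _; simp [pvMergeB]
  | cons c ds ih =>
    intro s hp hs
    have hds_ge : ∀ a ∈ ds, c ≤ a := fun a ha => List.rel_of_pairwise_cons hp ha
    have hsplit : s.takeWhile (fun x => decide (x < c)) ++ s.dropWhile (fun x => decide (x < c)) = s :=
      List.takeWhile_append_dropWhile
    have htw_lt : ∀ a ∈ s.takeWhile (fun x => decide (x < c)), a < c := by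
      intro a ha
      simpa using List.mem_takeWhile_imp ha
    simp only [pvMergeB]
    cases hdw : s.dropWhile (fun x => decide (x < c)) with
    | nil =>
      symm
      simp only [decide_eq_false_iff_not]
      intro hall
      have h1 := hall c
      have hcnt_tw : (s.takeWhile (fun x => decide (x < c))).count c = 0 :=
        List.count_eq_zero.mpr (fun hm => lt_irrefl c (htw_lt c hm))
      have hcs : s.count c = 0 := by
        rw [← hsplit, List.count_append, hdw, hcnt_tw]; rfl
      simp [List.count_cons_self, hcs] at h1
    | cons x rest =>
      have hdw_pw : (x :: rest).Pairwise (· ≤ ·) := hdw ▸ hs.sublist (List.dropWhile_sublist _)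
      have hcx : c ≤ x := by
        have := List.head_dropWhile_not (fun x => decide (x < c)) (l := s) (by simp [hdw])
        simp only [hdw] at this
        simpa using this
      have hcount_s : ∀ a : Char, s.count a
          = (s.takeWhile (fun y => decide (y < c))).count a + (x :: rest).count a := by
        intro a
        conv_lhs => rw [← hsplit]
        rw [List.count_append, hdw]
      by_cases hxc : x = c
      · subst hxc
        simp only [ne_eq, not_true_eq_false, if_false]
        rw [ih rest (List.Pairwise.of_cons hp) (List.Pairwise.of_cons hdw_pw)]
        apply decide_eq_decide.mpr
        constructor
        · intro hall a
          rw [hcount_s a]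
          have h1 := hall a
          by_cases hax : a = x
          · subst hax
            rw [List.count_cons_self, List.count_cons_self]
            omega
          · rw [List.count_cons_of_ne (Ne.symm hax), List.count_cons_of_ne (Ne.symm hax)]
            omega
        · intro hall a
          by_cases hac : a < x
          · have hnm : a ∉ ds := fun hm => absurd (hds_ge a hm) (not_le.mpr hac)
            have h0 : ds.count a = 0 := List.count_eq_zero.mpr hnm
            omega
          · have h1 := hall a
            rw [hcount_s a] at h1
            have htw0 : (s.takeWhile (fun y => decide (y < x))).count a = 0 :=
              List.count_eq_zero.mpr (fun hm => hac (htw_lt a hm))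
            rw [htw0] at h1
            by_cases hax : a = x
            · subst hax
              rw [List.count_cons_self, List.count_cons_self] at h1
              omega
            · rw [List.count_cons_of_ne (Ne.symm hax), List.count_cons_of_ne (Ne.symm hax)] at h1
              omega
      · have hcx' : c < x := lt_of_le_of_ne hcx (fun h => hxc h.symm)
        simp only [ne_eq, hxc, not_false_eq_true, if_true]
        symm
        simp only [decide_eq_false_iff_not]
        intro hall
        have h1 := hall c
        have hrest_ge : ∀ a ∈ rest, x ≤ a := fun a ha => List.rel_of_pairwise_cons hdw_pw ha
        have hcnt_dw : (x :: rest).count c = 0 := by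
          apply List.count_eq_zero.mpr
          intro hm
          rcases List.mem_cons.mp hm with h | h
          · exact absurd h.symm hxc
          · exact absurd (hrest_ge c h) (not_le.mpr hcx')
        have hcnt_tw : (s.takeWhile (fun y => decide (y < c))).count c = 0 :=
          List.count_eq_zero.mpr (fun hm => lt_irrefl c (htw_lt c hm))
        have hcs : s.count c = 0 := by
          rw [hcount_s c, hcnt_tw, hcnt_dw]
        simp [List.count_cons_self, hcs] at h1

-- ===== VERDICT (by name: the statement is the Claim_ definition above) =====
theorem generate_phrase_spec : Claim_equal_generate_phrase := by
  intro characters phrase _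
  unfold Spec_generate_phrase generate_phrase generate_phrase_alt
  rw [PySem.Dict.foldl_insert_getD_add_one_eq_counter, pvCheckLoopA_char,
    pvMergeB_char _ _ (PySem.List.sorted_pairwise ..) (PySem.List.sorted_pairwise ..)]
  apply decide_eq_decide.mpr
  have hpc : ∀ a : Char, (PySem.List.sorted phrase.toList (fun c => c) false).count a
      = phrase.toList.count a := fun a => (PySem.List.sorted_perm ..).count_eq a
  have hcc : ∀ a : Char, (PySem.List.sorted characters.toList (fun c => c) false).count a
      = characters.toList.count a := fun a => (PySem.List.sorted_perm ..).count_eq a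
  constructor
  · intro hall a
    rw [hpc, hcc]
    by_cases hm : a ∈ phrase.toList
    · have := hall a hm
      rw [PySem.Dict.getD_counter] at this
      omega
    · simp [List.count_eq_zero.mpr hm]
  · intro hall c _
    have := hall c
    rw [hpc, hcc] at this
    rw [PySem.Dict.getD_counter]
    omega
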